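-- pv_equiv track=rewrite | github.com/yubinbai/pcuva-problems | UVa 10018 Reverse and Add/main.py | reverseAdd
-- ===== SOURCE A (Python) =====
-- def reverseAdd(number):
--     original = number
--     reverse = 0
--     while number:
--         reverse *= 10
--         reverse += number % 10
--         number //= 10
--     return original + reverse
-- ===== SOURCE B (Python) =====
-- def reverseAdd(number):
--     rev = 0
--     place = 1
--     for ch in str(number):
--         rev += (ord(ch) - 48) * place
--         place *= 10
--     return number + rev
-- ===== Notes on version B (the rewrite author's own statement) =====
-- stated objective: alternative
-- what changed: B reads the decimal string of number most-significant-first, accumulating the reversed value with an explicit growing place value, instead of A's modulo/floor-division least-significant digit-peeling loop.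
import Mathlib
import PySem

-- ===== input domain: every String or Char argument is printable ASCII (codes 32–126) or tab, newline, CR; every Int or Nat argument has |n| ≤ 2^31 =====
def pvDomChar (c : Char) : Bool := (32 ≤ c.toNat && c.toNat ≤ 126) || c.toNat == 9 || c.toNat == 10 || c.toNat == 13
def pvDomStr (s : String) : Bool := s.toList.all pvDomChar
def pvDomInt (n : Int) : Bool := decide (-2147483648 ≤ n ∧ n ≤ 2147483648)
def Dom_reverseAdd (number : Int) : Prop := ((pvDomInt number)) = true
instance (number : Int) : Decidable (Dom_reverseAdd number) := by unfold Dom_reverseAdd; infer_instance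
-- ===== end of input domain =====

-- B replaces A's modulo/floor-division digit-peeling loop by a forward pass over the decimal
-- string with an explicit place value (objective: alternative, same cost).


-- ===== PORT A =====
-- the while loop; for number < 0 Python's loop never terminates (number //= 10 stays ≤ -1),
-- so that branch is unreachable under Pre_ and returns an arbitrary value (0) here
def reverseAddLoop (number reverse : Int) : Int :=
  if number = 0 then reverse
  else if _h : number < 0 then 0
  else reverseAddLoop (PySem.Int.floordiv number 10) (reverse * 10 + PySem.Int.mod number 10)
termination_by number.toNat
decreasing_by
  have h1 : ((number.toNat/10 : Nat) : Int) = number.fdiv 10 := by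
    rw [Int.ofNat_fdiv, Int.toNat_of_nonneg (by omega)]; norm_num
  simp only [PySem.Int.floordiv]
  rw [← h1, Int.toNat_natCast]
  omega

def reverseAdd (number : Int) : Int :=
  number + reverseAddLoop number 0

-- ===== PORT B =====
-- for ch in str(number): rev += (ord(ch) - 48) * place; place *= 10
def reverseAdd_alt (number : Int) : Int :=
  let s := (PySem.Int.toChars number).foldl
    (fun (st : Int × Int) (c : Char) => (st.1 + ((c.toNat : Int) - 48) * st.2, st.2 * 10))
    (0, 1)
  number + s.1

-- ===== PRECONDITION & SPEC =====
-- Pre_ excludes negative numbers, on which Python A's while loop never terminates (number //= 10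
-- stays negative forever); A returns no value there, so nothing is claimed about them.
def Pre_reverseAdd (number : Int) : Prop := 0 ≤ number
instance (number : Int) : Decidable (Pre_reverseAdd number) := by unfold Pre_reverseAdd; infer_instance
def pvWitness_reverseAdd : Int := 195

def Spec_reverseAdd (number : Int) (out : Int) : Prop := out = reverseAdd_alt number
instance (number : Int) (out : Int) : Decidable (Spec_reverseAdd number out) := by unfold Spec_reverseAdd; infer_instance

-- ===== CLAIM (what is proved, stated in full; the proofs are below) =====
def Claim_equal_reverseAdd : Prop := ∀ (number : Int), Dom_reverseAdd number → Pre_reverseAdd number → Spec_reverseAdd number (reverseAdd number)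

-- ===== LEMMAS AND PROOFS =====

-- Nat model of A's loop
def revN (m acc : Nat) : Nat :=
  if m = 0 then acc else revN (m / 10) (acc * 10 + m % 10)

theorem revN_small (m : Nat) (hm1 : 1 ≤ m) (hm : m < 10) (acc : Nat) : revN m acc = acc * 10 + m := by
  rw [revN]
  simp only [show ¬(m = 0) by omega, if_false]
  rw [Nat.div_eq_of_lt hm, Nat.mod_eq_of_lt hm, revN]
  simp

theorem revN_small0 (m : Nat) (hm : m < 10) : revN m 0 = m := by
  by_cases h0 : m = 0
  · subst h0; rw [revN]; simp
  · rw [revN_small m (by omega) hm]; simp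

theorem revN_acc (m : Nat) (hm : 1 ≤ m) (acc : Nat) :
    revN m acc = acc * 10 ^ (Nat.toDigits 10 m).length + revN m 0 := by
  induction m using Nat.strong_induction_on generalizing acc with
  | _ m ih =>
    by_cases hlt : m < 10
    · rw [Nat.toDigits_of_lt_base hlt]
      rw [revN_small m hm hlt, revN_small0 m hlt]
      simp only [List.length_singleton, pow_one]
    · rw [Nat.not_lt] at hlt
      have hd : m / 10 ≥ 1 := by omega
      have hlen : (Nat.toDigits 10 m).length = (Nat.toDigits 10 (m/10)).length + 1 := by
        rw [Nat.toDigits_of_base_le (by norm_num) hlt]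
        simp
      rw [revN]
      simp only [show ¬(m = 0) by omega, if_false]
      rw [ih (m/10) (by omega) hd]
      conv_rhs => rw [revN]
      simp only [show ¬(m = 0) by omega, if_false]
      simp only [Nat.zero_mul, Nat.zero_add]
      rw [ih (m/10) (by omega) hd (m % 10), hlen]
      ring

theorem loopA_eq_revN (m acc : Nat) : reverseAddLoop (m : Int) (acc : Int) = (revN m acc : Int) := by
  induction m using Nat.strong_induction_on generalizing acc with
  | _ m ih =>
    by_cases h0 : m = 0
    · subst h0; rw [reverseAddLoop, revN]; simp
    · rw [reverseAddLoop]
      have hne : ((m : Int) = 0) = False := by simp [h0]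
      have hneg : ¬((m : Int) < 0) := by omega
      simp only [hne, if_false, hneg, dite_false]
      have hfd : PySem.Int.floordiv (m : Int) 10 = ((m / 10 : Nat) : Int) := by
        simp only [PySem.Int.floordiv]
        rw [Int.ofNat_fdiv]; norm_num
      have hmd : PySem.Int.mod (m : Int) 10 = ((m % 10 : Nat) : Int) := by
        simp only [PySem.Int.mod]
        rw [show ((10:Int)) = ((10:Nat):Int) from rfl, ← Int.ofNat_fmod]
      rw [hfd, hmd]
      have hrec : (acc : Int) * 10 + ((m % 10 : Nat) : Int) = ((acc * 10 + m % 10 : Nat) : Int) := by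
        push_cast; ring
      rw [hrec, ih (m/10) (Nat.div_lt_self (by omega) (by norm_num))]
      conv_rhs => rw [revN]
      simp [h0]

theorem digitChar_val (d : Nat) (hd : d < 10) : ((Nat.digitChar d).toNat : Int) - 48 = d := by
  interval_cases d <;> rfl

theorem fold_toDigits (m : Nat) (r p : Int) :
    ((Nat.toDigits 10 m).foldl
      (fun (st : Int × Int) (c : Char) => (st.1 + ((c.toNat : Int) - 48) * st.2, st.2 * 10))
      (r, p))
    = (r + p * (revN m 0 : Int), p * 10 ^ (Nat.toDigits 10 m).length) := by
  induction m using Nat.strong_induction_on generalizing r p with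
  | _ m ih =>
    by_cases hlt : m < 10
    · rw [Nat.toDigits_of_lt_base hlt]
      simp only [List.foldl_cons, List.foldl_nil, List.length_singleton]
      rw [digitChar_val m hlt, revN_small0 m hlt]
      simp only [Prod.mk.injEq, pow_one]
      exact ⟨by ring, trivial⟩
    · rw [Nat.not_lt] at hlt
      have hd : 1 ≤ m / 10 := by omega
      rw [Nat.toDigits_of_base_le (by norm_num) hlt]
      rw [List.foldl_append]
      rw [ih (m/10) (Nat.div_lt_self (by omega) (by norm_num))]
      simp only [List.foldl_cons, List.foldl_nil, List.length_append, List.length_singleton]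
      rw [digitChar_val (m % 10) (Nat.mod_lt _ (by norm_num))]
      have hrev : (revN m 0 : Int) = ((m % 10 : Nat) : Int) * 10 ^ (Nat.toDigits 10 (m/10)).length + (revN (m/10) 0 : Int) := by
        conv_lhs => rw [revN]
        simp only [show ¬(m = 0) by omega, if_false]
        rw [show (0 * 10 + m % 10) = m % 10 by ring]
        rw [revN_acc (m/10) hd (m % 10)]
        push_cast; ring
      rw [hrev]
      simp only [Prod.mk.injEq, pow_succ]
      constructor <;> ring

-- ===== VERDICT (by name: the statement is the Claim_ definition above) =====
theorem reverseAdd_spec : Claim_equal_reverseAdd := by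
  intro n _ hpre
  unfold Pre_reverseAdd at hpre
  unfold Spec_reverseAdd reverseAdd reverseAdd_alt
  have hn : n = ((n.toNat : Nat) : Int) := by omega
  have hchars : PySem.Int.toChars n = Nat.toDigits 10 n.toNat := by
    simp only [PySem.Int.toChars, if_neg (by omega : ¬ n < 0)]
  have hl : reverseAddLoop n 0 = ((revN n.toNat 0 : Nat) : Int) := by
    rw [hn]; exact_mod_cast loopA_eq_revN n.toNat 0
  rw [hchars, fold_toDigits, hl]
  simp
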